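-- pv_equiv track=rewrite | github.com/ksks48/Python-labs | Осн. прог. Пайтон/Контрольна робота/t2.py | f
-- ===== SOURCE A (Python) =====
-- def f(my_list):
--     first_list = []
--     second_list = []
--     for i in my_list:
--         if i < 0:
--             first_list.append(i)
--         else:
--             second_list.append(i)
--     first_list.sort()
--     second_list.sort()
--     second_list.reverse()
--     new_list = []
--     for a in first_list:
--         new_list.append(a)
--     for b in second_list:
--         new_list.append(b)
--     return new_list
-- ===== SOURCE B (Python) =====
-- def f(my_list):
--     s = sorted(my_list)
--     k = sum(1 for x in my_list if x < 0)
--     return s[:k] + s[k:][::-1]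
-- ===== Notes on version B (the rewrite author's own statement) =====
-- stated objective: simpler
-- what changed: Replaces the partition loop, two separate sorts and two copy loops with a single global sort, a count of negatives to find the split point, and a slice-and-reverse of the non-negative suffix.
import Mathlib
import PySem

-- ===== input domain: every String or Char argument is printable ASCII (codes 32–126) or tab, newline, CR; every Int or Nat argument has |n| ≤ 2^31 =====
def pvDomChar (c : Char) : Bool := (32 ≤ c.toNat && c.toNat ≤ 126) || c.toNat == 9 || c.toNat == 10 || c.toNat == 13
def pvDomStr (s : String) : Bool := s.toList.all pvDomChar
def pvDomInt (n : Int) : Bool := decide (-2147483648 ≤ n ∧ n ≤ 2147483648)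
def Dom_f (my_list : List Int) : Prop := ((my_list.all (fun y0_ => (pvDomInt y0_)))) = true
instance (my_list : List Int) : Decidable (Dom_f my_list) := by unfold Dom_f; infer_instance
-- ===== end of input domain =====

-- B replaces A's partition + two sorts + two copy loops by one global sort, a count of
-- negatives to find the split point, and a slice-and-reverse of the non-negative suffix.

-- ===== PORT A =====
def f (my_list : List Int) : List Int :=
  -- partition loop: first_list (negatives), second_list (non-negatives)
  let p := my_list.foldl
    (fun (p : List Int × List Int) i =>
      if i < 0 then (p.1 ++ [i], p.2) else (p.1, p.2 ++ [i]))
    (([] : List Int), ([] : List Int))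
  -- first_list.sort()
  let first := PySem.List.sorted p.1 (fun x => x) false
  -- second_list.sort(); second_list.reverse()
  let second := (PySem.List.sorted p.2 (fun x => x) false).reverse
  -- new_list = []; the two append loops
  let n1 := first.foldl (fun acc a => acc ++ [a]) ([] : List Int)
  second.foldl (fun acc b => acc ++ [b]) n1

-- ===== PORT B =====
def f_alt (my_list : List Int) : List Int :=
  -- s = sorted(my_list)
  let s := PySem.List.sorted my_list (fun x => x) false
  -- k = sum(1 for x in my_list if x < 0)
  let k : Int := my_list.foldl (fun acc x => if x < 0 then acc + 1 else acc) (0 : Int)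
  -- s[:k] + s[k:][::-1]  ([::-1] is exactly List.reverse: PySem.List.slice?_none_none_neg_one)
  PySem.List.slice s none (some k) ++ (PySem.List.slice s (some k) none).reverse

-- ===== PRECONDITION & SPEC =====
def Spec_f (my_list : List Int) (out : List Int) : Prop := out = f_alt my_list
instance (my_list : List Int) (out : List Int) : Decidable (Spec_f my_list out) := by unfold Spec_f; infer_instance

-- ===== CLAIM (what is proved, stated in full; the proofs are below) =====
def Claim_equal_f : Prop := ∀ (my_list : List Int), Dom_f my_list → Spec_f my_list (f my_list)

-- ===== LEMMAS AND PROOFS =====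

-- A's partition loop is the two filters.
theorem pv_partition (l a b : List Int) :
    l.foldl (fun (p : List Int × List Int) i =>
      if i < 0 then (p.1 ++ [i], p.2) else (p.1, p.2 ++ [i])) (a, b)
    = (a ++ l.filter (fun x => decide (x < 0)),
       b ++ l.filter (fun x => !decide (x < 0))) := by
  induction l generalizing a b with
  | nil => simp
  | cons x t ih =>
    by_cases hx : x < 0 <;> simp [hx, ih]

-- the copy loops are append
theorem pv_copy (l acc : List Int) :
    l.foldl (fun acc a => acc ++ [a]) acc = acc ++ l := by
  induction l generalizing acc with
  | nil => simp
  | cons x t ih => simp [ih]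

-- B's counting loop counts the negatives
theorem pv_count (l : List Int) (acc : Int) :
    l.foldl (fun acc x => if x < 0 then acc + 1 else acc) acc
    = acc + ((l.filter (fun x => decide (x < 0))).length : Int) := by
  induction l generalizing acc with
  | nil => simp
  | cons x t ih =>
    by_cases hx : x < 0 <;> simp [hx, ih]; ring

-- the global sort splits as sorted negatives ++ sorted non-negatives
theorem pv_sorted_split (l : List Int) :
    PySem.List.sorted l (fun x => x) false
    = PySem.List.sorted (l.filter (fun x => decide (x < 0))) (fun x => x) false
      ++ PySem.List.sorted (l.filter (fun x => !decide (x < 0))) (fun x => x) false := by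
  apply PySem.List.sorted_id_eq_of_perm_of_pairwise
  · exact ((PySem.List.sorted_perm _ _ _).append (PySem.List.sorted_perm _ _ _)).trans
      (List.filter_append_perm _ l)
  · refine List.pairwise_append.2 ⟨PySem.List.sorted_pairwise _ _, PySem.List.sorted_pairwise _ _, ?_⟩
    intro x hx y hy
    have hx' : x ∈ l.filter (fun x => decide (x < 0)) :=
      (PySem.List.mem_sorted _ _ _ _).1 hx
    have hy' : y ∈ l.filter (fun x => !decide (x < 0)) :=
      (PySem.List.mem_sorted _ _ _ _).1 hy
    have h1 : x < 0 := by have := List.of_mem_filter hx'; simpa using this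
    have h2 : ¬ y < 0 := by have := List.of_mem_filter hy'; simpa using this
    omega

-- ===== VERDICT (by name: the statement is the Claim_ definition above) =====
theorem f_spec : Claim_equal_f := by
  intro l _
  unfold Spec_f f f_alt
  simp only [pv_partition, pv_copy, pv_count, List.nil_append, Int.zero_add]
  rw [pv_sorted_split l]
  set P := PySem.List.sorted (l.filter (fun x => decide (x < 0))) (fun x => x) false with hP
  set Q := PySem.List.sorted (l.filter (fun x => !decide (x < 0))) (fun x => x) false with hQ
  have hlen : P.length = (l.filter (fun x => decide (x < 0))).length := by
    rw [hP]; exact PySem.List.length_sorted _ _ _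
  rw [← hlen]
  rw [PySem.List.slice_to_natCast, PySem.List.slice_from_natCast]
  simp
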